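-- pv_equiv track=rewrite | github.com/minseokpark6/Problem_Solving | 프로그래머스/2/42584. 주식가격/주식가격.py | solution
-- ===== SOURCE A (Python) =====
-- def solution(prices):
--     # 빈 리스트 생성
--     answer = []
--
--     # 가격이 떨어지지 않은 기간
--     for idx in range(len(prices)):
--         p, temp = prices[idx], 0
--
--         while idx+1 < len(prices):
--             idx += 1
--             if p <= prices[idx]:
--                 temp += 1
--             elif p > prices[idx]:
--                 temp += 1
--                 break
--
--         answer.append(temp)
--
--     # 출력
--     return answer
-- ===== SOURCE B (Python) =====
-- def solution(prices):
--     n = len(prices)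
--     answer = [0] * n
--     stack = []  # indices with not-yet-dropped prices, non-decreasing prices bottom->top
--     for i in range(n):
--         p = prices[i]
--         while stack and prices[stack[-1]] > p:
--             j = stack.pop()
--             answer[j] = i - j
--         stack.append(i)
--     while stack:
--         j = stack.pop()
--         answer[j] = n - 1 - j
--     return answer
-- ===== Notes on version B (the rewrite author's own statement) =====
-- stated objective: faster
-- what changed: Replaced A's per-index forward rescan (nested while over the suffix) with a single-pass monotonic stack that resolves each index's duration at the moment its price first drops.
import Mathlib
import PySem

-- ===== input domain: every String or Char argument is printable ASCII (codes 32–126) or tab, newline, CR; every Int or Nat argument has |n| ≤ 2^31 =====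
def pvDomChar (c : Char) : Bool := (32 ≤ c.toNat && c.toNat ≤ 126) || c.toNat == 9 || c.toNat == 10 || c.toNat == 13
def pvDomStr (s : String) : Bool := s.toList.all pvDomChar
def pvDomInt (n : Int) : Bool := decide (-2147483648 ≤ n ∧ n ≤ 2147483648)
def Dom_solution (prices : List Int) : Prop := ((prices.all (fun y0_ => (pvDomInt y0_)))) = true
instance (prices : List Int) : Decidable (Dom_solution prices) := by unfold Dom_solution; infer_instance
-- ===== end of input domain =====

-- B replaces A's quadratic per-index rescan with a one-pass monotonic index stack (objective: faster, asymptotic).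

-- ===== PORT A =====
-- inner while loop of A: counts steps from idx+1 until (and including) the first strict drop below p
def innerA (prices : List Int) (p : Int) (idx : Nat) : Int :=
  if _h : idx + 1 < prices.length then
    if p ≤ prices.getD (idx + 1) 0 then 1 + innerA prices p (idx + 1)
    else 1
  else 0
termination_by prices.length - idx

def solution (prices : List Int) : List Int :=
  (List.range prices.length).foldl
    (fun answer idx => answer ++ [innerA prices (prices.getD idx 0) idx]) []

-- ===== PORT B =====
-- the inner `while stack and prices[stack[-1]] > p` loop of B (stack head = top)
def popLoop (prices : List Int) (i : Nat) : List Nat → List Int → List Nat × List Int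
  | [], ans => ([], ans)
  | j :: rest, ans =>
    if prices.getD i 0 < prices.getD j 0 then
      popLoop prices i rest (ans.set j ((i : Int) - (j : Int)))
    else (j :: rest, ans)

def solution_alt (prices : List Int) : List Int :=
  let n := prices.length
  let step := (List.range n).foldl
    (fun sa i => let r := popLoop prices i sa.1 sa.2; (i :: r.1, r.2))
    ([], List.replicate n (0 : Int))
  -- final `while stack: j = stack.pop(); answer[j] = n - 1 - j`
  step.1.foldl (fun a j => a.set j ((n : Int) - 1 - (j : Int))) step.2

-- ===== PRECONDITION & SPEC =====
def Spec_solution (prices : List Int) (out : List Int) : Prop := out = solution_alt prices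
instance (prices : List Int) (out : List Int) : Decidable (Spec_solution prices out) := by unfold Spec_solution; infer_instance

-- ===== CLAIM (what is proved, stated in full; the proofs are below) =====
def Claim_equal_solution : Prop := ∀ (prices : List Int), Dom_solution prices → Spec_solution prices (solution prices)

-- ===== LEMMAS AND PROOFS =====

-- `hasDropB P j i` : some index m with j < m < i has a strictly smaller price than P[j]
def hasDropB (P : List Int) (j i : Nat) : Bool :=
  (List.range i).any (fun m => decide (j < m) && decide (P.getD m 0 < P.getD j 0))

-- first index after j whose price is strictly below P[j] (meaningful when hasDropB P j P.length)
def fd (P : List Int) (j : Nat) : Nat :=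
  j + 1 + (P.drop (j + 1)).findIdx (fun q => decide (q < P.getD j 0))

-- answer array contents after the main loop has processed indices < i
def ansAt (P : List Int) (i : Nat) : List Int :=
  (List.range P.length).map (fun j => if hasDropB P j i then ((fd P j : Int) - (j : Int)) else 0)

-- stack contents after the main loop has processed indices < i (head = top of stack)
def goodStack (P : List Int) (i : Nat) : List Nat :=
  ((List.range i).filter (fun j => ! hasDropB P j i)).reverse

-- duration counted by A's inner loop, as a function of the price and the remaining suffix
def specDur (p : Int) : List Int → Int
  | [] => 0
  | q :: t => 1 + (if q < p then 0 else specDur p t)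

theorem innerA_eq_specDur (P : List Int) (p : Int) (idx : Nat) :
    innerA P p idx = specDur p (P.drop (idx + 1)) := by
  rw [innerA]
  by_cases h : idx + 1 < P.length
  · rw [dif_pos h, List.drop_eq_getElem_cons h, specDur, List.getD_eq_getElem P 0 h]
    by_cases hp : p ≤ P[idx + 1]
    · rw [if_pos hp, if_neg (by omega), innerA_eq_specDur P p (idx + 1)]
    · rw [if_neg hp, if_pos (by omega)]; ring
  · rw [dif_neg h, List.drop_eq_nil_of_le (by omega), specDur]
termination_by P.length - idx

theorem foldl_append_map {α β : Type} (f : α → β) (l : List α) :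
    ∀ acc : List β, l.foldl (fun a x => a ++ [f x]) acc = acc ++ l.map f := by
  induction l with
  | nil => intro acc; simp
  | cons x t ih => intro acc; simp [List.foldl_cons, ih]

theorem solution_eq_specMap (P : List Int) :
    solution P = (List.range P.length).map (fun j => specDur (P.getD j 0) (P.drop (j + 1))) := by
  unfold solution
  rw [foldl_append_map]
  simp only [List.nil_append]
  exact List.map_congr_left (fun j _ => innerA_eq_specDur P (P.getD j 0) j)

theorem specDur_findIdx (p : Int) (t : List Int) :
    specDur p t = if t.any (fun q => decide (q < p)) then ((t.findIdx (fun q => decide (q < p)) : Int) + 1) else (t.length : Int) := by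
  induction t with
  | nil => simp [specDur]
  | cons q t ih =>
    rw [specDur, ih, List.any_cons, List.findIdx_cons]
    by_cases hq : q < p
    · simp [hq]
    · by_cases ha : (t.any fun q => decide (q < p)) = true
      · simp [hq, ha]; omega
      · simp [hq, ha]; omega

theorem hasDropB_iff (P : List Int) (j i : Nat) :
    hasDropB P j i = true ↔ ∃ m, j < m ∧ m < i ∧ P.getD m 0 < P.getD j 0 := by
  simp only [hasDropB, List.any_eq_true, List.mem_range, Bool.and_eq_true, decide_eq_true_eq]
  constructor
  · rintro ⟨m, h1, h2, h3⟩; exact ⟨m, h2, h1, h3⟩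
  · rintro ⟨m, h1, h2, h3⟩; exact ⟨m, h2, h1, h3⟩

theorem any_drop_iff (P : List Int) (j : Nat) :
    (((P.drop (j + 1)).any fun q => decide (q < P.getD j 0)) = true) ↔
      ∃ m, j < m ∧ m < P.length ∧ P.getD m 0 < P.getD j 0 := by
  rw [List.any_eq_true]
  constructor
  · rintro ⟨x, hx, hlt⟩
    obtain ⟨k, hk, rfl⟩ := List.mem_iff_getElem.mp hx
    have hkl : j + 1 + k < P.length := by
      have := hk; rw [List.length_drop] at this; omega
    refine ⟨j + 1 + k, by omega, hkl, ?_⟩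
    rw [List.getD_eq_getElem P 0 hkl]
    rw [List.getElem_drop] at hlt
    simpa using hlt
  · rintro ⟨m, hjm, hmn, hlt⟩
    refine ⟨P[m], List.mem_iff_getElem.mpr ⟨m - (j + 1), by rw [List.length_drop]; omega, ?_⟩, ?_⟩
    · rw [List.getElem_drop]; congr 1; omega
    · rw [List.getD_eq_getElem P 0 hmn] at hlt; simpa using hlt

theorem specDur_char (P : List Int) (j : Nat) (hj : j < P.length) :
    specDur (P.getD j 0) (P.drop (j + 1)) =
      if hasDropB P j P.length then ((fd P j : Int) - (j : Int))
      else ((P.length : Int) - 1 - (j : Int)) := by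
  rw [specDur_findIdx]
  by_cases h : hasDropB P j P.length = true
  · rw [if_pos h, if_pos (by rw [any_drop_iff]; exact (hasDropB_iff P j P.length).mp h)]
    simp only [fd]
    push_cast
    ring
  · rw [if_neg h, if_neg ?hne]
    · rw [List.length_drop]; omega
    case hne =>
      intro hc
      exact h ((hasDropB_iff P j P.length).mpr ((any_drop_iff P j).mp hc))

theorem popLoop_eq (P : List Int) (i : Nat) (s : List Nat) (ans : List Int) :
    popLoop P i s ans =
      (s.dropWhile (fun j => decide (P.getD i 0 < P.getD j 0)),
       (s.takeWhile (fun j => decide (P.getD i 0 < P.getD j 0))).foldl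
         (fun a j => a.set j ((i : Int) - (j : Int))) ans) := by
  induction s generalizing ans with
  | nil => simp [popLoop]
  | cons j rest ih =>
    rw [popLoop, List.dropWhile_cons, List.takeWhile_cons]
    by_cases h : P.getD i 0 < P.getD j 0
    · rw [if_pos h, ih, decide_eq_true h]; simp
    · rw [if_neg h, decide_eq_false h]; simp

theorem dw_tw_filter {α : Type} (p : α → Bool) :
    ∀ l : List α, (l.Pairwise fun a b => p b = true → p a = true) →
      l.dropWhile p = l.filter (fun x => ! p x) ∧ l.takeWhile p = l.filter p := by
  intro l hl
  induction l with
  | nil => simp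
  | cons a t ih =>
    rw [List.pairwise_cons] at hl
    obtain ⟨ha, ht⟩ := hl
    obtain ⟨ihd, iht⟩ := ih ht
    by_cases hp : p a = true
    · simp [hp, ihd, iht]
    · constructor
      · rw [List.dropWhile_cons]
        simp only [hp, if_false, Bool.false_eq_true]
        have : t.filter (fun x => ! p x) = t := List.filter_eq_self.mpr (by
          intro b hb
          simp only [Bool.not_eq_eq_eq_not, Bool.not_true]
          exact Bool.eq_false_iff.mpr (fun hpb => hp (ha b hb hpb)))
        simp [hp, this]
      · rw [List.takeWhile_cons]
        simp only [hp, if_false, Bool.false_eq_true]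
        have : t.filter p = [] := List.filter_eq_nil_iff.mpr (by
          intro b hb hpb
          exact hp (ha b hb hpb))
        simp [hp, this]

theorem mem_goodStack (P : List Int) (i j : Nat) :
    j ∈ goodStack P i ↔ j < i ∧ hasDropB P j i = false := by
  simp [goodStack, List.mem_reverse, List.mem_filter, List.mem_range]

theorem noDrop_mono (P : List Int) {j i m : Nat} (h : hasDropB P j i = false)
    (h1 : j < m) (h2 : m < i) : P.getD j 0 ≤ P.getD m 0 := by
  by_contra hc
  rw [← Bool.not_eq_true, hasDropB_iff] at h
  exact h ⟨m, h1, h2, by omega⟩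

theorem goodStack_pairwise (P : List Int) (i : Nat) :
    (goodStack P i).Pairwise
      (fun a b => decide (P.getD i 0 < P.getD b 0) = true →
        decide (P.getD i 0 < P.getD a 0) = true) := by
  rw [goodStack, List.pairwise_reverse]
  have hlt : (List.range i).Pairwise (· < ·) := List.pairwise_lt_range
  have hf := hlt.filter (p := fun j => ! hasDropB P j i)
  refine hf.imp_of_mem ?_
  intro a b ha hb hab hpb
  rw [List.mem_filter, List.mem_range] at ha hb
  simp only [decide_eq_true_eq] at hpb ⊢
  have hgood : hasDropB P a i = false := by
    have := ha.2; simpa using this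
  have : P.getD a 0 ≤ P.getD b 0 := noDrop_mono P hgood hab hb.1
  omega

-- the stack after step i, as popLoop leaves it (before pushing i)
theorem hasDropB_succ' (P : List Int) (j i : Nat) :
    hasDropB P j (i + 1) =
      (hasDropB P j i || (decide (j < i) && decide (P.getD i 0 < P.getD j 0))) := by
  simp [hasDropB, List.range_succ, List.any_append]

theorem goodStack_succ (P : List Int) (i : Nat) :
    goodStack P (i + 1) =
      i :: (goodStack P i).filter (fun j => ! decide (P.getD i 0 < P.getD j 0)) := by
  have hii : hasDropB P i (i + 1) = false := by
    rw [← Bool.not_eq_true, hasDropB_iff]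
    rintro ⟨m, h1, h2, _⟩; omega
  rw [goodStack, goodStack, List.range_succ, List.filter_append]
  have h1 : List.filter (fun j => !hasDropB P j (i + 1)) [i] = [i] := by simp [hii]
  rw [h1, List.reverse_append, List.filter_reverse, List.filter_filter]
  simp only [List.reverse_cons, List.reverse_nil, List.nil_append, List.singleton_append]
  congr 1
  congr 1
  apply List.filter_congr
  intro a ha
  rw [List.mem_range] at ha
  rw [hasDropB_succ']
  simp [ha, Bool.not_or, Bool.and_comm]

theorem foldl_set_length (f : Nat → Int) :
    ∀ (js : List Nat) (a : List Int),
      (js.foldl (fun a j => a.set j (f j)) a).length = a.length := by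
  intro js
  induction js with
  | nil => intro a; simp
  | cons j t ih => intro a; rw [List.foldl_cons, ih]; simp

theorem foldl_set_getD (f : Nat → Int) :
    ∀ (js : List Nat) (a : List Int) (k : Nat),
      (js.foldl (fun a j => a.set j (f j)) a).getD k 0 =
        if k ∈ js ∧ k < a.length then f k else a.getD k 0 := by
  intro js
  induction js with
  | nil => intro a k; simp
  | cons j t ih =>
    intro a k
    rw [List.foldl_cons, ih]
    simp only [List.length_set, List.mem_cons]
    have hset : (a.set j (f j)).getD k 0 = if j = k ∧ k < a.length then f j else a.getD k 0 := by
      rw [List.getD_eq_getElem?_getD, List.getElem?_set, List.getD_eq_getElem?_getD]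
      by_cases hjk : j = k
      · subst hjk
        by_cases hl : j < a.length
        · simp [hl]
        · simp [hl]
      · simp [hjk]
    rw [hset]
    by_cases hjk : j = k
    · subst hjk
      by_cases hl : j < a.length
      · by_cases hmem : j ∈ t <;> simp [hmem, hl]
      · by_cases hmem : j ∈ t <;> simp [hmem, hl]
    · have hkj : ¬k = j := fun h => hjk h.symm
      have hne : ¬(j = k ∧ k < a.length) := fun h => hjk h.1
      rw [if_neg hne]
      by_cases hmem : k ∈ t
      · simp [hmem]
      · simp [hmem, hkj]

theorem ansAt_length (P : List Int) (i : Nat) : (ansAt P i).length = P.length := by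
  simp [ansAt]

theorem ansAt_getD (P : List Int) (i k : Nat) (hk : k < P.length) :
    (ansAt P i).getD k 0 =
      if hasDropB P k i = true then ((fd P k : Int) - (k : Int)) else 0 := by
  have hk' : k < (ansAt P i).length := by rw [ansAt_length]; exact hk
  rw [List.getD_eq_getElem _ 0 hk']
  simp [ansAt]

theorem fd_eq (P : List Int) {k i : Nat} (hk : k < i) (hi : i < P.length)
    (hnd : hasDropB P k i = false) (hlt : P.getD i 0 < P.getD k 0) : fd P k = i := by
  rw [fd]
  have hfi : (P.drop (k + 1)).findIdx (fun q => decide (q < P.getD k 0)) = i - (k + 1) := by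
    rw [List.findIdx_eq (by rw [List.length_drop]; omega)]
    constructor
    · rw [List.getElem_drop]
      have he : k + 1 + (i - (k + 1)) = i := by omega
      simp only [he, decide_eq_true_eq]
      rwa [List.getD_eq_getElem P 0 hi] at hlt
    · intro m hm
      rw [List.getElem_drop]
      have h1 : k < k + 1 + m := by omega
      have h2 : k + 1 + m < i := by omega
      have hle := noDrop_mono P hnd h1 h2
      have hml : k + 1 + m < P.length := by omega
      rw [List.getD_eq_getElem P 0 hml] at hle
      simp only [decide_eq_false_iff_not, not_lt]
      exact hle
  rw [hfi]; omega

theorem ans_step (P : List Int) (i : Nat) (hi : i < P.length) :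
    ((goodStack P i).filter (fun j => decide (P.getD i 0 < P.getD j 0))).foldl
      (fun a j => a.set j ((i : Int) - (j : Int))) (ansAt P i) = ansAt P (i + 1) := by
  apply List.ext_getElem
  · rw [foldl_set_length (fun j => (i : Int) - (j : Int)), ansAt_length, ansAt_length]
  intro k h1 h2
  have hk : k < P.length := by
    rw [foldl_set_length (fun j => (i : Int) - (j : Int)), ansAt_length] at h1
    exact h1
  rw [← List.getD_eq_getElem _ 0 h1, ← List.getD_eq_getElem _ 0 h2]
  rw [foldl_set_getD (fun j => (i : Int) - (j : Int)), ansAt_getD P i k hk,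
    ansAt_getD P (i + 1) k hk, ansAt_length]
  by_cases hmem : k ∈ (goodStack P i).filter (fun j => decide (P.getD i 0 < P.getD j 0))
  · rw [if_pos ⟨hmem, hk⟩]
    rw [List.mem_filter, mem_goodStack] at hmem
    obtain ⟨⟨hki, hnd⟩, hlt⟩ := hmem
    rw [decide_eq_true_eq] at hlt
    have hdp : hasDropB P k (i + 1) = true := by
      rw [hasDropB_iff]; exact ⟨i, hki, by omega, hlt⟩
    rw [if_pos hdp, fd_eq P hki hi hnd hlt]
  · rw [if_neg (fun h => hmem h.1)]
    rw [List.mem_filter, mem_goodStack] at hmem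
    have hsame : hasDropB P k (i + 1) = hasDropB P k i := by
      rw [hasDropB_succ']
      by_cases hd : hasDropB P k i = true
      · simp [hd]
      · rw [Bool.not_eq_true] at hd
        simp only [hd, Bool.false_or]
        by_cases hki : k < i
        · have hc : ¬P.getD i 0 < P.getD k 0 := fun hlt =>
            hmem ⟨⟨hki, hd⟩, decide_eq_true hlt⟩
          rw [decide_eq_false hc]
          simp
        · simp [hki]
    rw [hsame]

theorem mainLoop_inv (P : List Int) (i : Nat) (hi : i ≤ P.length) :
    (List.range i).foldl
      (fun sa k => let r := popLoop P k sa.1 sa.2; (k :: r.1, r.2))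
      ([], List.replicate P.length (0 : Int))
    = (goodStack P i, ansAt P i) := by
  induction i with
  | zero =>
    simp only [List.range_zero, List.foldl_nil]
    have hgs : goodStack P 0 = [] := by simp [goodStack]
    have hans : ansAt P 0 = List.replicate P.length 0 := by
      apply List.ext_getElem
      · simp [ansAt_length]
      intro k h1 h2
      have hk : k < P.length := by rw [ansAt_length] at h1; exact h1
      rw [← List.getD_eq_getElem _ 0 h1, ansAt_getD P 0 k hk]
      have h0 : hasDropB P k 0 = false := by simp [hasDropB]
      simp [h0]
    rw [hgs, hans]
  | succ i ih =>
    rw [List.range_succ, List.foldl_append, ih (by omega), List.foldl_cons, List.foldl_nil]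
    simp only [popLoop_eq]
    obtain ⟨hd, ht⟩ := dw_tw_filter _ (goodStack P i) (goodStack_pairwise P i)
    rw [hd, ht, ans_step P i (by omega), goodStack_succ]

theorem solution_alt_eq_specMap (P : List Int) :
    solution_alt P = (List.range P.length).map (fun j => specDur (P.getD j 0) (P.drop (j + 1))) := by
  show ((List.range P.length).foldl
      (fun sa i => let r := popLoop P i sa.1 sa.2; (i :: r.1, r.2))
      ([], List.replicate P.length (0 : Int))).1.foldl
      (fun a j => a.set j ((P.length : Int) - 1 - (j : Int)))
      ((List.range P.length).foldl
      (fun sa i => let r := popLoop P i sa.1 sa.2; (i :: r.1, r.2))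
      ([], List.replicate P.length (0 : Int))).2 = _
  rw [mainLoop_inv P P.length le_rfl]
  apply List.ext_getElem
  · rw [foldl_set_length (fun j => (P.length : Int) - 1 - (j : Int)), ansAt_length]
    simp
  intro k h1 h2
  have hk : k < P.length := by
    rw [foldl_set_length (fun j => (P.length : Int) - 1 - (j : Int)), ansAt_length] at h1
    exact h1
  rw [← List.getD_eq_getElem _ 0 h1]
  rw [foldl_set_getD (fun j => (P.length : Int) - 1 - (j : Int)), ansAt_length,
    ansAt_getD P P.length k hk]
  rw [List.getElem_map, List.getElem_range, specDur_char P k hk]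
  by_cases hmem : k ∈ goodStack P P.length
  · rw [if_pos ⟨hmem, hk⟩]
    have := (mem_goodStack P P.length k).mp hmem
    rw [if_neg (by rw [this.2]; exact Bool.false_ne_true)]
  · rw [if_neg (fun h => hmem h.1)]
    have hdp : hasDropB P k P.length = true := by
      by_contra hc
      exact hmem ((mem_goodStack P P.length k).mpr ⟨hk, Bool.not_eq_true _ ▸ (Bool.eq_false_iff.mpr hc)⟩)
    rw [if_pos hdp, if_pos hdp]

-- ===== VERDICT (by name: the statement is the Claim_ definition above) =====
theorem solution_spec : Claim_equal_solution := by
  intro P _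
  unfold Spec_solution
  rw [solution_eq_specMap, solution_alt_eq_specMap]
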